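-- pv_equiv track=rewrite | github.com/Redstonedust653/markov_chain | ai_tools.py | ngram_occurrences
-- ===== SOURCE A (Python) =====
-- def ngram_occurrences(ngrams:list[list[list[str]]]) -> dict[tuple,dict[tuple,int]]:
--     after_counts:dict[tuple,dict[tuple,int]] = {}
--     for sample in ngrams:
--         for gram_idx in range(len(sample)-1):
--             a = tuple(sample[gram_idx])
--             b = tuple(sample[gram_idx+1])
--             # TODO: count "b happened after a"
--             if a not in after_counts:
--                 after_counts[a] = {b:1}
--             else:
--                 after_counts[a][b] = after_counts[a].get(b,0) + 1
--     return after_counts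
-- ===== SOURCE B (Python) =====
-- def ngram_occurrences(ngrams:list[list[list[str]]]) -> dict[tuple,dict[tuple,int]]:
--     # phase 1: one flat count of every consecutive (gram, next_gram) transition pair
--     flat:dict[tuple,int] = {}
--     for sample in ngrams:
--         for a, b in zip(sample, sample[1:]):
--             key = (tuple(a), tuple(b))
--             flat[key] = flat.get(key, 0) + 1
--     # phase 2: regroup the flat counts into the nested dict
--     after_counts:dict[tuple,dict[tuple,int]] = {}
--     for (a, b), c in flat.items():
--         after_counts.setdefault(a, {})[b] = c
--     return after_counts
-- ===== Notes on version B (the rewrite author's own statement) =====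
-- stated objective: alternative
-- what changed: A fuses counting and nesting in one loop that updates a dict-of-dicts per consecutive pair; B first builds one flat counter keyed by the (gram, next_gram) pair over all samples (zip with tail), then regroups the flat (pair, count) items into the nested dict in a second pass.
import Mathlib
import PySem

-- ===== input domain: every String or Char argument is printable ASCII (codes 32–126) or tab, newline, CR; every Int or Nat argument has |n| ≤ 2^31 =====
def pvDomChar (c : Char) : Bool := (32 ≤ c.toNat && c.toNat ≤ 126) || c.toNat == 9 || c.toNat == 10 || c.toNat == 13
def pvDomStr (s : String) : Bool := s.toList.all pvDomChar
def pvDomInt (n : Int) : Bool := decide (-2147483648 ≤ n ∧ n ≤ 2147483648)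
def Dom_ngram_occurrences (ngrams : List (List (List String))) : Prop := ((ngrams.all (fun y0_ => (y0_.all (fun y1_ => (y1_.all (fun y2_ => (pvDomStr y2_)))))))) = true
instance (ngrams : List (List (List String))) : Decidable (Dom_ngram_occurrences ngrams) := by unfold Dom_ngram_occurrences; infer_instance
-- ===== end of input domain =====

-- B replaces A's fused nested-dict build with a two-phase decomposition (one flat count of
-- transition pairs, then a regroup pass); objective: alternative structure, same cost.

-- ===== PORT A =====
-- loop body of A: count "b happened after a" in the nested dict (branch order as in A)
def pvStepA {κ : Type} [BEq κ] (ac : PySem.Dict κ (PySem.Dict κ Int)) (a b : κ) :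
    PySem.Dict κ (PySem.Dict κ Int) :=
  if ac.contains a = false then ac.insert a (PySem.Dict.empty.insert b 1)
  else ac.insert a ((ac.getD a PySem.Dict.empty).insert b
        ((ac.getD a PySem.Dict.empty).getD b 0 + 1))

def ngram_occurrences (ngrams : List (List (List String))) :
    List (List String × List (List String × Int)) :=
  (ngrams.foldl (fun ac sample =>
      (PySem.List.pyRange 0 (PySem.List.len sample - 1)).foldl
        (fun ac i => pvStepA ac (PySem.List.pyGetD sample i []) (PySem.List.pyGetD sample (i + 1) []))
        ac)
    PySem.Dict.empty).items.map (fun p => (p.1, p.2.items))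

-- ===== PORT B =====
-- B phase-1 step: flat count of one transition pair
def pvFlatStep {κ : Type} [BEq κ] (f : PySem.Dict (κ × κ) Int) (p : κ × κ) : PySem.Dict (κ × κ) Int :=
  f.insert p (f.getD p 0 + 1)

-- B phase-2 step: regroup one flat item into the nested dict (setdefault(a,{})[b]=c)
def pvGroupStep {κ : Type} [BEq κ] (o : PySem.Dict κ (PySem.Dict κ Int)) (qc : (κ × κ) × Int) :
    PySem.Dict κ (PySem.Dict κ Int) :=
  o.insert qc.1.1 ((o.getD qc.1.1 PySem.Dict.empty).insert qc.1.2 qc.2)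

def ngram_occurrences_alt (ngrams : List (List (List String))) :
    List (List String × List (List String × Int)) :=
  let flat := ngrams.foldl (fun f sample => (sample.zip sample.tail).foldl pvFlatStep f)
      (PySem.Dict.empty : PySem.Dict (List String × List String) Int)
  (flat.items.foldl pvGroupStep PySem.Dict.empty).items.map (fun p => (p.1, p.2.items))

-- ===== PRECONDITION & SPEC =====
def Spec_ngram_occurrences (ngrams : List (List (List String))) (out : List (List String × List (List String × Int))) : Prop := out = ngram_occurrences_alt ngrams
instance (ngrams : List (List (List String))) (out : List (List String × List (List String × Int))) : Decidable (Spec_ngram_occurrences ngrams out) := by unfold Spec_ngram_occurrences; infer_instance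

-- ===== CLAIM (what is proved, stated in full; the proofs are below) =====
def Claim_equal_ngram_occurrences : Prop := ∀ (ngrams : List (List (List String))), Dom_ngram_occurrences ngrams → Spec_ngram_occurrences ngrams (ngram_occurrences ngrams)

-- ===== LEMMAS AND PROOFS =====
-- index loop = zip-with-tail loop
theorem pv_idx_nat {σ α : Type} (F : σ → α → α → σ) (d : α) :
    ∀ (x : α) (t : List α) (st : σ),
      (List.range t.length).foldl (fun ac k => F ac ((x :: t).getD k d) ((x :: t).getD (k + 1) d)) st
        = ((x :: t).zip t).foldl (fun ac p => F ac p.1 p.2) st := by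
  intro x t
  induction t generalizing x with
  | nil => intro st; rfl
  | cons y t ih =>
      intro st
      rw [List.length_cons, List.range_succ_eq_map, List.foldl_cons, List.foldl_map]
      simpa using ih y (F st x y)

theorem pv_idx (σ α : Type) (F : σ → α → α → σ) (d : α) (s : List α) (st : σ) :
    (PySem.List.pyRange 0 (PySem.List.len s - 1)).foldl
        (fun ac i => F ac (PySem.List.pyGetD s i d) (PySem.List.pyGetD s (i + 1) d)) st
      = (s.zip s.tail).foldl (fun ac p => F ac p.1 p.2) st := by
  cases s with
  | nil => rfl
  | cons x t =>
      have h1 : PySem.List.len (x :: t) - 1 = (t.length : Int) := by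
        simp [PySem.List.len_eq]
      rw [h1, PySem.List.pyRange_zero_natCast, List.foldl_map]
      have h2 : (fun (ac : σ) (k : Nat) =>
          F ac (PySem.List.pyGetD (x :: t) (k : Int) d) (PySem.List.pyGetD (x :: t) ((k : Int) + 1) d))
          = fun ac k => F ac ((x :: t).getD k d) ((x :: t).getD (k + 1) d) := by
        funext ac k
        have : ((k : Int) + 1) = ((k + 1 : Nat) : Int) := by push_cast; ring
        rw [this, PySem.List.pyGetD_natCast, PySem.List.pyGetD_natCast]
      rw [h2, pv_idx_nat]
      simp

-- getD of the regroup fold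
theorem pv_regroup_getD {κ : Type} [BEq κ] [LawfulBEq κ]
    (L : List ((κ × κ) × Int)) :
    ∀ (o : PySem.Dict κ (PySem.Dict κ Int)) (a : κ),
      (L.foldl pvGroupStep o).getD a PySem.Dict.empty
        = (L.filter (fun qc => qc.1.1 == a)).foldl
            (fun inner qc => inner.insert qc.1.2 qc.2) (o.getD a PySem.Dict.empty) := by
  induction L with
  | nil => intro o a; rfl
  | cons q L ih =>
      intro o a
      by_cases h : q.1.1 = a
      · rw [List.foldl_cons, ih, List.filter_cons_of_pos (by simpa using h), List.foldl_cons]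
        subst h
        rw [show (pvGroupStep o q).getD q.1.1 PySem.Dict.empty
              = (o.getD q.1.1 PySem.Dict.empty).insert q.1.2 q.2 from
            PySem.Dict.getD_insert_self ..]
      · rw [List.foldl_cons, ih, List.filter_cons_of_neg (by simpa using h)]
        rw [show (pvGroupStep o q).getD a PySem.Dict.empty = o.getD a PySem.Dict.empty from
            PySem.Dict.getD_insert_of_ne _ _ _ (fun hh => h hh.symm)]

theorem pv_keys_regroup {κ : Type} [BEq κ] [LawfulBEq κ] (L : List ((κ × κ) × Int)) :
    (L.foldl pvGroupStep (PySem.Dict.empty : PySem.Dict κ (PySem.Dict κ Int))).keys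
      = PySem.Set.update (PySem.Dict.empty : PySem.Dict κ (PySem.Dict κ Int)).keys (L.map (fun qc => qc.1.1)) := by
  exact PySem.Dict.keys_foldl_insert_key L (fun qc => qc.1.1)
    (fun o qc => (o.getD qc.1.1 PySem.Dict.empty).insert qc.1.2 qc.2) PySem.Dict.empty

theorem pv_nodup_regroup {κ : Type} [BEq κ] [LawfulBEq κ] (L : List ((κ × κ) × Int)) :
    (L.foldl pvGroupStep (PySem.Dict.empty : PySem.Dict κ (PySem.Dict κ Int))).keys.Nodup := by
  exact PySem.Dict.nodup_keys_foldl_insert_key L (fun qc => qc.1.1)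
    (fun o qc => (o.getD qc.1.1 PySem.Dict.empty).insert qc.1.2 qc.2) PySem.Dict.empty
    (by rw [PySem.Dict.keys_empty]; exact List.nodup_nil)

theorem pv_nodup_seconds {κ : Type} [BEq κ] [LawfulBEq κ] (L : List ((κ × κ) × Int)) (a : κ)
    (h : (L.map (fun qc => qc.1)).Nodup) :
    ((L.filter (fun qc => qc.1.1 == a)).map (fun qc => qc.1.2)).Nodup := by
  have h1 : ((L.filter (fun qc => qc.1.1 == a)).map (fun qc => qc.1)).Nodup :=
    h.sublist ((List.filter_sublist (l := L)).map _)
  have h2 : ∀ qc ∈ L.filter (fun qc => qc.1.1 == a), qc.1.1 = a := by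
    intro qc hqc
    have := List.of_mem_filter hqc
    simpa using this
  have : (L.filter (fun qc => qc.1.1 == a)).map (fun qc => qc.1.2)
      = ((L.filter (fun qc => qc.1.1 == a)).map (fun qc => qc.1)).map Prod.snd := by
    simp [List.map_map]
  rw [this]
  apply List.Nodup.map_on _ h1
  intro p hp q hq hpq
  obtain ⟨pc, hpc, rfl⟩ := List.mem_map.mp hp
  obtain ⟨qc, hqc, rfl⟩ := List.mem_map.mp hq
  have := h2 pc hpc; have := h2 qc hqc
  apply Prod.ext <;> simp_all

theorem pv_inner {κ : Type} [BEq κ] [LawfulBEq κ] (L : List ((κ × κ) × Int)) (a : κ)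
    (h : (L.map (fun qc => qc.1)).Nodup) :
    (L.foldl pvGroupStep (PySem.Dict.empty : PySem.Dict κ (PySem.Dict κ Int))).getD a PySem.Dict.empty
      = PySem.Dict.mk ((L.filter (fun qc => qc.1.1 == a)).map (fun qc => (qc.1.2, qc.2))) := by
  rw [pv_regroup_getD]
  apply PySem.Dict.ext
  have := PySem.Dict.items_foldl_insert_fresh (L.filter (fun qc => qc.1.1 == a))
    (fun qc => qc.1.2) (fun qc => qc.2) PySem.Dict.empty
    (by intro x hx; rfl) (pv_nodup_seconds L a h)
  simpa using this

theorem pv_one_step {κ : Type} [BEq κ] [LawfulBEq κ] (f : PySem.Dict (κ × κ) Int)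
    (q : κ × κ) (hnd : f.keys.Nodup) :
    (pvFlatStep f q).items.foldl pvGroupStep PySem.Dict.empty
      = pvStepA (f.items.foldl pvGroupStep PySem.Dict.empty) q.1 q.2 := by
  obtain ⟨a, b⟩ := q
  have hndL : (f.items.map (fun qc => qc.1)).Nodup := by
    simpa [PySem.Dict.keys] using hnd
  by_cases hc : f.contains (a, b) = true
  · -- the transition pair is already counted
    obtain ⟨c, hc'⟩ : ∃ c, f.get? (a, b) = some c := by
      have := PySem.Dict.contains_eq_isSome_get? f (a, b)
      rw [hc] at this
      exact Option.isSome_iff_exists.mp this.symm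
    have hmem : ((a, b), c) ∈ f.items := PySem.Dict.mem_items_of_get?_eq_some f hc'
    have hgetD : f.getD (a, b) 0 = c := by
      rw [PySem.Dict.getD_eq_get?_getD, hc']; rfl
    have hitems : (pvFlatStep f (a, b)).items
        = f.items.map (fun p => if p.1 == (a, b) then ((a, b), c + 1) else p) := by
      rw [pvFlatStep, hgetD]; exact PySem.Dict.items_insert_of_contains f _ hc
    set L := f.items with hL
    set bump := fun p : (κ × κ) × Int => if p.1 == (a, b) then ((a, b), c + 1) else p with hbump
    have hfirst : ∀ p : (κ × κ) × Int, (bump p).1 = p.1 := by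
      intro p
      by_cases h : p.1 == (a, b)
      · have := eq_of_beq h; simp [hbump, this]
      · simp [hbump, h]
    have hmapfst : (L.map bump).map (fun qc => qc.1) = L.map (fun qc => qc.1) := by
      rw [List.map_map]; exact List.map_congr_left (fun p _ => hfirst p)
    have hmapfst1 : (L.map bump).map (fun qc => qc.1.1) = L.map (fun qc => qc.1.1) := by
      rw [List.map_map]; exact List.map_congr_left (fun p _ => by simp [hfirst p])
    have hndL' : ((L.map bump).map (fun qc => qc.1)).Nodup := by rw [hmapfst]; exact hndL
    set M := (L.filter (fun qc => qc.1.1 == a)).map (fun qc => (qc.1.2, qc.2)) with hM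
    have hMmem : (b, c) ∈ M := by
      rw [hM]
      exact List.mem_map.mpr ⟨((a, b), c), List.mem_filter.mpr ⟨hmem, by simp⟩, rfl⟩
    have hMnodup : (PySem.Dict.mk M).keys.Nodup := by
      have : M.map (fun m => m.1) = (L.filter (fun qc => qc.1.1 == a)).map (fun qc => qc.1.2) := by
        rw [hM, List.map_map]; rfl
      simpa [PySem.Dict.keys, this] using pv_nodup_seconds L a hndL
    have hMb : (PySem.Dict.mk M).contains b = true := by
      rw [PySem.Dict.contains_iff_mem_keys]
      simp only [PySem.Dict.keys, List.mem_map]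
      exact ⟨(b, c), hMmem, rfl⟩
    set R := L.foldl pvGroupStep (PySem.Dict.empty : PySem.Dict κ (PySem.Dict κ Int)) with hR
    have hRa : R.contains a = true := by
      rw [PySem.Dict.contains_iff_mem_keys, hR, pv_keys_regroup]
      rw [PySem.Set.mem_update]
      exact Or.inr (List.mem_map.mpr ⟨((a, b), c), hmem, rfl⟩)
    have hRgetD : R.getD a PySem.Dict.empty = PySem.Dict.mk M := pv_inner L a hndL
    have hstep : pvStepA R a b = R.insert a ((PySem.Dict.mk M).insert b (c + 1)) := by
      rw [pvStepA, if_neg (by simp [hRa]), hRgetD,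
        PySem.Dict.getD_of_mem_items _ hMmem hMnodup]
    rw [hitems]
    show (L.map bump).foldl pvGroupStep PySem.Dict.empty = pvStepA R a b
    rw [hstep]
    -- both sides are dicts; compare items via keys + getD
    have hgd : ∀ a', ((L.map bump).foldl pvGroupStep PySem.Dict.empty).getD a' PySem.Dict.empty
        = (R.insert a ((PySem.Dict.mk M).insert b (c + 1))).getD a' PySem.Dict.empty := by
      intro a'
      by_cases ha' : a' = a
      · subst ha'
        rw [PySem.Dict.getD_insert_self, pv_inner (L.map bump) a' hndL']
        apply PySem.Dict.ext
        rw [PySem.Dict.items_insert_of_contains _ _ hMb]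
        show ((L.map bump).filter (fun qc => qc.1.1 == a')).map (fun qc => (qc.1.2, qc.2)) = _
        rw [List.filter_map, List.map_map]
        have hpred : (fun qc : (κ × κ) × Int => qc.1.1 == a') ∘ bump
            = fun qc => qc.1.1 == a' := by
          funext p; simp [Function.comp, hfirst p]
        rw [hpred, hM, List.map_map]
        apply List.map_congr_left
        intro qc hqc
        have hqa : qc.1.1 = a' := by simpa using (List.mem_filter.mp hqc).2
        obtain ⟨⟨qa, qb⟩, qv⟩ := qc
        simp only at hqa
        subst hqa
        by_cases hqb : qb = b
        · subst hqb; simp [hbump]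
        · simp [Function.comp, hbump, hqb, Prod.ext_iff]
      · rw [PySem.Dict.getD_insert_of_ne _ _ _ ha', hR,
          pv_regroup_getD, pv_regroup_getD, List.filter_map]
        have hpred : (fun qc : (κ × κ) × Int => qc.1.1 == a') ∘ bump
            = fun qc => qc.1.1 == a' := by
          funext p; simp [Function.comp, hfirst p]
        rw [hpred]
        have : (L.filter (fun qc => qc.1.1 == a')).map bump
            = L.filter (fun qc => qc.1.1 == a') := by
          have hid : ∀ qc ∈ L.filter (fun qc => qc.1.1 == a'), bump qc = qc := by
            intro qc hqc
            have hqa : qc.1.1 = a' := by simpa using (List.mem_filter.mp hqc).2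
            have : ¬ (qc.1 == (a, b)) = true := by
              intro h
              exact ha' (by rw [← hqa, eq_of_beq h])
            simp [hbump, this]
          exact (List.map_congr_left (g := id) hid).trans (List.map_id _)
        rw [this]
    have hkeys : ((L.map bump).foldl pvGroupStep
          (PySem.Dict.empty : PySem.Dict κ (PySem.Dict κ Int))).keys
        = (R.insert a ((PySem.Dict.mk M).insert b (c + 1))).keys := by
      rw [pv_keys_regroup, hmapfst1, PySem.Dict.keys_insert_of_contains _ _ hRa, hR,
        pv_keys_regroup]
    apply PySem.Dict.ext
    rw [PySem.Dict.items_eq_map_keys _ (pv_nodup_regroup (L.map bump)) PySem.Dict.empty,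
      PySem.Dict.items_eq_map_keys _
        (PySem.Dict.nodup_keys_insert _ _ _ (pv_nodup_regroup L)) PySem.Dict.empty,
      hkeys]
    exact List.map_congr_left (fun k _ => by rw [hgd k])
  · -- first time this transition pair is seen
    have hc0 : f.contains (a, b) = false := by simpa using hc
    have hgetD : f.getD (a, b) 0 = 0 := PySem.Dict.getD_of_not_contains f 0 hc0
    have hitems : (pvFlatStep f (a, b)).items = f.items ++ [((a, b), 0 + 1)] := by
      rw [pvFlatStep, hgetD]; exact PySem.Dict.items_insert_of_not_contains f _ hc0
    rw [hitems, List.foldl_append]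
    set L := f.items with hL
    set R := L.foldl pvGroupStep (PySem.Dict.empty : PySem.Dict κ (PySem.Dict κ Int)) with hR
    show pvGroupStep R ((a, b), 0 + 1) = pvStepA R a b
    by_cases hRa : R.contains a = true
    · have hRgetD : R.getD a PySem.Dict.empty
          = PySem.Dict.mk ((L.filter (fun qc => qc.1.1 == a)).map (fun qc => (qc.1.2, qc.2))) :=
        pv_inner L a (by simpa [PySem.Dict.keys] using hnd)
      have hMb : (R.getD a PySem.Dict.empty).contains b = false := by
        rw [hRgetD]
        by_contra h
        have h' : (PySem.Dict.mk ((L.filter (fun qc => qc.1.1 == a)).map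
            (fun qc => (qc.1.2, qc.2)))).contains b = true := by
          cases hh : (PySem.Dict.mk ((L.filter (fun qc => qc.1.1 == a)).map
              (fun qc => (qc.1.2, qc.2)))).contains b
          · exact absurd hh h
          · rfl
        rw [PySem.Dict.contains_iff_mem_keys] at h'
        simp only [PySem.Dict.keys, List.map_map, List.mem_map] at h'
        obtain ⟨qc, hqc, hqb⟩ := h'
        have hqa : qc.1.1 = a := by simpa using (List.mem_filter.mp hqc).2
        have : (a, b) ∈ L.map (fun qc => qc.1) := by
          refine List.mem_map.mpr ⟨qc, (List.mem_filter.mp hqc).1, ?_⟩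
          have : qc.1 = (qc.1.1, qc.1.2) := rfl
          rw [this, hqa]
          simpa using hqb
        have : f.contains (a, b) = true := by
          rw [PySem.Dict.contains_iff_mem_keys]
          simpa [PySem.Dict.keys] using this
        rw [this] at hc0; exact absurd hc0 (by simp)
      rw [pvStepA, if_neg (by simp [hRa]), pvGroupStep,
        PySem.Dict.getD_of_not_contains _ 0 hMb]
    · have hRa0 : R.contains a = false := by simpa using hRa
      rw [pvStepA, if_pos (by simp [hRa0]), pvGroupStep,
        PySem.Dict.getD_of_not_contains _ PySem.Dict.empty hRa0]
      norm_num

theorem pv_flat_nodup {κ : Type} [BEq κ] [LawfulBEq κ] (ps : List (κ × κ))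
    (f : PySem.Dict (κ × κ) Int) (hnd : f.keys.Nodup) :
    (ps.foldl pvFlatStep f).keys.Nodup :=
  PySem.Dict.nodup_keys_foldl_insert ps (fun d p => d.getD p 0 + 1) f hnd

theorem pv_inner_fold {κ : Type} [BEq κ] [LawfulBEq κ] (ps : List (κ × κ)) :
    ∀ (f : PySem.Dict (κ × κ) Int), f.keys.Nodup →
      (ps.foldl pvFlatStep f).items.foldl pvGroupStep PySem.Dict.empty
        = ps.foldl (fun n p => pvStepA n p.1 p.2)
            (f.items.foldl pvGroupStep PySem.Dict.empty) := by
  induction ps with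
  | nil => intro f _; rfl
  | cons q ps ih =>
      intro f hnd
      rw [List.foldl_cons, List.foldl_cons,
        ih (pvFlatStep f q) (PySem.Dict.nodup_keys_insert f q _ hnd),
        pv_one_step f q hnd]

theorem pv_outer {κ : Type} [BEq κ] [LawfulBEq κ] (ngrams : List (List κ)) :
    ∀ (f : PySem.Dict (κ × κ) Int), f.keys.Nodup →
      (ngrams.foldl (fun f sample => (sample.zip sample.tail).foldl pvFlatStep f) f).items.foldl
          pvGroupStep PySem.Dict.empty
        = ngrams.foldl (fun n sample => (sample.zip sample.tail).foldl
              (fun n p => pvStepA n p.1 p.2) n)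
            (f.items.foldl pvGroupStep PySem.Dict.empty) := by
  induction ngrams with
  | nil => intro f _; rfl
  | cons s ngrams ih =>
      intro f hnd
      rw [List.foldl_cons, List.foldl_cons,
        ih ((s.zip s.tail).foldl pvFlatStep f) (pv_flat_nodup _ f hnd),
        pv_inner_fold _ f hnd]

-- ===== VERDICT (by name: the statement is the Claim_ definition above) =====
theorem ngram_occurrences_spec : Claim_equal_ngram_occurrences := by
  unfold Claim_equal_ngram_occurrences
  intro ngrams _
  unfold Spec_ngram_occurrences ngram_occurrences ngram_occurrences_alt
  have hfun : (fun (ac : PySem.Dict (List String) (PySem.Dict (List String) Int))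
        (sample : List (List String)) =>
      (PySem.List.pyRange 0 (PySem.List.len sample - 1)).foldl
        (fun ac i => pvStepA ac (PySem.List.pyGetD sample i [])
          (PySem.List.pyGetD sample (i + 1) [])) ac)
      = fun ac sample => (sample.zip sample.tail).foldl (fun n p => pvStepA n p.1 p.2) ac := by
    funext ac sample
    exact pv_idx _ _ pvStepA [] sample ac
  rw [hfun]
  show _ = List.map (fun p => (p.1, p.2.items))
    ((List.foldl (fun f sample => List.foldl pvFlatStep f (sample.zip sample.tail))
      PySem.Dict.empty ngrams).items.foldl pvGroupStep PySem.Dict.empty).items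
  rw [pv_outer ngrams PySem.Dict.empty
    (by rw [PySem.Dict.keys_empty]; exact List.nodup_nil)]
  rfl
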